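-- pv_equiv track=rewrite | github.com/Starman26/FRED_WEB | api_server.py | _triage_anomalies
-- ===== SOURCE A (Python) =====
-- def _triage_anomalies(anomalies: list) -> dict:
--     """Classify anomalies into action categories.
--
--     Returns: {"auto_fix": [...], "diagnose": [...], "notify": [...]}
--     """
--     auto_fix = []
--     diagnose = []
--     notify = []
--
--     for a in anomalies:
--         severity = a.get("severity", "low")
--         atype = a.get("type", "")
--
--         if severity == "critical":
--             notify.append(a)
--         elif atype == "active_error" and severity in ("warning", "info"):
--             auto_fix.append(a)
--         elif atype == "station_offline":
--             diagnose.append(a)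
--         else:
--             diagnose.append(a)
--
--     return {"auto_fix": auto_fix, "diagnose": diagnose, "notify": notify}
-- ===== SOURCE B (Python) =====
-- def _triage_anomalies(anomalies: list) -> dict:
--     """Classify anomalies into action categories (three independent filter passes)."""
--     def _category(a):
--         sev = a.get("severity", "low")
--         if sev == "critical":
--             return "notify"
--         if a.get("type", "") == "active_error" and sev in ("warning", "info"):
--             return "auto_fix"
--         return "diagnose"
--     return {k: [a for a in anomalies if _category(a) == k]
--             for k in ("auto_fix", "diagnose", "notify")}
-- ===== Notes on version B (the rewrite author's own statement) =====
-- stated objective: simpler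
-- what changed: Replaced the single bucketing loop with three appends by a category helper plus three independent filter passes (a dict comprehension), removing the mutable accumulators and the redundant station_offline branch.
import Mathlib
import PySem

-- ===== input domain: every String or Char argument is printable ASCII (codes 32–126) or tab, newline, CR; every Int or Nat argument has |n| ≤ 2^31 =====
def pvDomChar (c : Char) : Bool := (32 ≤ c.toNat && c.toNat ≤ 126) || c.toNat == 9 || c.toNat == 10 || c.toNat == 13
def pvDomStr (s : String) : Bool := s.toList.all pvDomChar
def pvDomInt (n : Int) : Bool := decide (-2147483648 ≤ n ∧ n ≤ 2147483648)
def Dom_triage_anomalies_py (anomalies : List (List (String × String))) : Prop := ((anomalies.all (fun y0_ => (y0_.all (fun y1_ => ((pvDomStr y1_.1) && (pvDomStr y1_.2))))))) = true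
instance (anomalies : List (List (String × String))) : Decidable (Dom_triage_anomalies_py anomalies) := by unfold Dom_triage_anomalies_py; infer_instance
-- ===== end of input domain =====

-- B replaces the single bucketing loop by a category helper and three independent filter passes ('simpler').

-- shared Python primitive: dict.get(k, dflt) on the association list (first match)
def pvGet (a : List (String × String)) (k dflt : String) : String :=
  match a.lookup k with
  | some v => v
  | none => dflt

-- ===== PORT A =====
-- single loop, three mutable accumulators, appended in branch order
-- loop body of A (one anomaly classified into the (auto_fix, diagnose, notify) state)
def pvStepA (st : List (List (String × String)) × List (List (String × String)) × List (List (String × String)))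
    (a : List (String × String)) :
    List (List (String × String)) × List (List (String × String)) × List (List (String × String)) :=
  let severity := pvGet a "severity" "low"
  let atype := pvGet a "type" ""
  if severity == "critical" then (st.1, st.2.1, st.2.2 ++ [a])
  else if atype == "active_error" && (severity == "warning" || severity == "info") then (st.1 ++ [a], st.2.1, st.2.2)
  else if atype == "station_offline" then (st.1, st.2.1 ++ [a], st.2.2)
  else (st.1, st.2.1 ++ [a], st.2.2)

def triage_anomalies_py (anomalies : List (List (String × String))) : List (String × List (List (String × String))) :=
  let st := anomalies.foldl pvStepA ([], [], [])
  [("auto_fix", st.1), ("diagnose", st.2.1), ("notify", st.2.2)]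

-- ===== PORT B =====
-- helper: the category of one anomaly (Source B's _category)
def pvCategory (a : List (String × String)) : String :=
  let sev := pvGet a "severity" "low"
  if sev == "critical" then "notify"
  else if pvGet a "type" "" == "active_error" && (sev == "warning" || sev == "info") then "auto_fix"
  else "diagnose"

def triage_anomalies_py_alt (anomalies : List (List (String × String))) : List (String × List (List (String × String))) :=
  (["auto_fix", "diagnose", "notify"]).map
    (fun k => (k, anomalies.filter (fun a => pvCategory a == k)))

-- ===== PRECONDITION & SPEC =====
def Spec_triage_anomalies_py (anomalies : List (List (String × String))) (out : List (String × List (List (String × String)))) : Prop := out = triage_anomalies_py_alt anomalies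
instance (anomalies : List (List (String × String))) (out : List (String × List (List (String × String)))) : Decidable (Spec_triage_anomalies_py anomalies out) := by unfold Spec_triage_anomalies_py; infer_instance

-- ===== CLAIM (what is proved, stated in full; the proofs are below) =====
def Claim_equal_triage_anomalies_py : Prop := ∀ (anomalies : List (List (String × String))), Dom_triage_anomalies_py anomalies → Spec_triage_anomalies_py anomalies (triage_anomalies_py anomalies)

-- ===== LEMMAS AND PROOFS =====

-- loop invariant: A's fold extends each accumulator with the corresponding filter
theorem pv_fold_filter (anomalies : List (List (String × String)))
    (af dg nt : List (List (String × String))) :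
    anomalies.foldl pvStepA (af, dg, nt)
    = (af ++ anomalies.filter (fun a => pvCategory a == "auto_fix"),
       dg ++ anomalies.filter (fun a => pvCategory a == "diagnose"),
       nt ++ anomalies.filter (fun a => pvCategory a == "notify")) := by
  induction anomalies generalizing af dg nt with
  | nil => simp
  | cons a rest ih =>
    simp only [List.foldl_cons, List.filter_cons]
    by_cases h1 : (pvGet a "severity" "low" == "critical") = true
    · rw [show pvStepA (af, dg, nt) a = (af, dg, nt ++ [a]) from by simp [pvStepA, h1], ih]
      simp [pvCategory, h1]
    · by_cases h2 : (pvGet a "type" "" == "active_error"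
          && (pvGet a "severity" "low" == "warning" || pvGet a "severity" "low" == "info")) = true
      · rw [show pvStepA (af, dg, nt) a = (af ++ [a], dg, nt) from by simp only [pvStepA]; rw [if_neg h1, if_pos h2], ih]
        simp [pvCategory, h1, h2]
      · rw [show pvStepA (af, dg, nt) a = (af, dg ++ [a], nt) from by
            simp only [pvStepA]; rw [if_neg h1, if_neg h2]; split <;> rfl, ih]
        simp [pvCategory, h1, h2]

-- ===== VERDICT (by name: the statement is the Claim_ definition above) =====
theorem triage_anomalies_py_spec : Claim_equal_triage_anomalies_py := by
  intro anomalies _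
  unfold Spec_triage_anomalies_py triage_anomalies_py triage_anomalies_py_alt
  simp [pv_fold_filter]
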